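-- pv_equiv track=rewrite | github.com/syhya/learning-notes | algorithm/paiza/s045.ある種のソート.py | dp
-- ===== SOURCE A (Python) =====
-- def dp(nums):
--     n = len(nums)
--     dp = [1]*n
--     for i in range(n):
--         for j in range(i):
--             if nums[i]-1 == nums[j]:
--                 dp[i] = max(dp[i], dp[j]+1)
--     return n-max(dp)
-- ===== SOURCE B (Python) =====
-- def dp(nums):
--     best = {}
--     longest = 0
--     for v in nums:
--         nb = max(best.get(v, 0), best.get(v - 1, 0) + 1)
--         best[v] = nb
--         if nb > longest:
--             longest = nb
--     return len(nums) - longest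
-- ===== Notes on version B (the rewrite author's own statement) =====
-- stated objective: faster
-- what changed: Replaced the O(n^2) nested index loops over a dp array by a single left-to-right pass keeping a dict from value to the best chain length ending at that value, plus a running maximum.
import Mathlib
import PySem

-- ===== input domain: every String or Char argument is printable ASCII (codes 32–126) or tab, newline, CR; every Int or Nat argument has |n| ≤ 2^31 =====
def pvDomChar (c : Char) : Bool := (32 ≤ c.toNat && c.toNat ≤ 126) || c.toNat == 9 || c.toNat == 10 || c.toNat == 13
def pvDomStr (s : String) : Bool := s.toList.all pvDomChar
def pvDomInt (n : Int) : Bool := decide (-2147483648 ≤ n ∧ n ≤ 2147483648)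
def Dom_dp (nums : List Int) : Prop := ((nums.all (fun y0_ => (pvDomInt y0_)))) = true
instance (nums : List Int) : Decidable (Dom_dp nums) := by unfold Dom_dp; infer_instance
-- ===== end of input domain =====

-- B replaces A's O(n^2) nested index loops by a single pass with a dict mapping value -> best
-- chain length so far (objective: faster, asymptotic O(n^2) -> O(n)).


-- ===== PORT A =====
-- inner loop: 'for j in range(i): if nums[i]-1 == nums[j]: dp[i] = max(dp[i], dp[j]+1)'
def dpInner (nums : List Int) (arr : List Int) (i : Nat) : List Int :=
  (List.range i).foldl
    (fun a j =>
      if (nums.getD i 0 - 1) == nums.getD j 0 then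
        a.set i (max (a.getD i 0) (a.getD j 0 + 1))
      else a)
    arr

def dp (nums : List Int) : Int :=
  let n := nums.length
  let arr := (List.range n).foldl (fun a i => dpInner nums a i) (List.replicate n (1 : Int))
  (n : Int) - ((PySem.List.max? arr (fun x => x)).getD 0)

-- ===== PORT B =====
def dp_alt (nums : List Int) : Int :=
  let st := nums.foldl
    (fun (st : PySem.Dict Int Int × Int) v =>
      let nb := max (st.1.getD v 0) (st.1.getD (v - 1) 0 + 1)
      (st.1.insert v nb, if nb > st.2 then nb else st.2))
    (PySem.Dict.empty, 0)
  (nums.length : Int) - st.2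

-- ===== PRECONDITION & SPEC =====
-- Pre_ excludes only the empty list, on which A's 'max(dp)' raises ValueError.
def Pre_dp (nums : List Int) : Prop := nums ≠ []
instance (nums : List Int) : Decidable (Pre_dp nums) := by unfold Pre_dp; infer_instance
def pvWitness_dp : List Int := [3, 1, 4, 2, 3]

def Spec_dp (nums : List Int) (out : Int) : Prop := out = dp_alt nums
instance (nums : List Int) (out : Int) : Decidable (Spec_dp nums out) := by unfold Spec_dp; infer_instance

-- ===== CLAIM (what is proved, stated in full; the proofs are below) =====
def Claim_equal_dp : Prop := ∀ (nums : List Int), Dom_dp nums → Pre_dp nums → Spec_dp nums (dp nums)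

-- ===== LEMMAS AND PROOFS =====

-- Common specification: process values left to right; f maps a value to the best chain
-- length ending at that value among the processed prefix (0 if absent); sStep yields the
-- updated f and the chain length of the newly processed element.
def sStep (f : Int → Int) (v : Int) : (Int → Int) × Int :=
  let a := f (v - 1) + 1
  ((fun w => if w = v then max (f v) a else f w), a)

def sList (f : Int → Int) : List Int → List Int
  | [] => []
  | v :: r => (sStep f v).2 :: sList (sStep f v).1 r

def sF (f : Int → Int) : List Int → Int → Int
  | [] => f
  | v :: r => sF (sStep f v).1 r

theorem sList_length (f : Int → Int) (l : List Int) : (sList f l).length = l.length := by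
  induction l generalizing f with
  | nil => rfl
  | cons v r ih => simp [sList, ih]

theorem sList_append (f : Int → Int) (l1 l2 : List Int) :
    sList f (l1 ++ l2) = sList f l1 ++ sList (sF f l1) l2 := by
  induction l1 generalizing f with
  | nil => rfl
  | cons v r ih => simp [sList, sF, ih]

theorem sF_mono (f : Int → Int) (l : List Int) (w : Int) : f w ≤ sF f l w := by
  induction l generalizing f with
  | nil => simp [sF]
  | cons v r ih =>
    refine le_trans ?_ (ih (sStep f v).1)
    simp only [sStep]
    split <;> simp_all

theorem sF_nonneg (f : Int → Int) (l : List Int) (w : Int) (h : ∀ u, 0 ≤ f u) :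
    0 ≤ sF f l w := le_trans (h w) (sF_mono f l w)

theorem sList_pos (f : Int → Int) (l : List Int) (h : ∀ u, 0 ≤ f u) :
    ∀ x ∈ sList f l, 1 ≤ x := by
  induction l generalizing f with
  | nil => simp [sList]
  | cons v r ih =>
    intro x hx
    simp only [sList, List.mem_cons] at hx
    rcases hx with rfl | hx
    · simp only [sStep]; have := h (v - 1); omega
    · refine ih (sStep f v).1 ?_ x hx
      intro u; simp only [sStep]
      split <;> [skip; exact h u]
      have := h v; simp; omega

-- ===== B side =====

theorem B_loop (l : List Int) (d : PySem.Dict Int Int) (f : Int → Int) (m : Int)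
    (hd : ∀ w, d.getD w 0 = f w) (hm : ∀ w, f w ≤ m) :
    (l.foldl
      (fun (st : PySem.Dict Int Int × Int) v =>
        let nb := max (st.1.getD v 0) (st.1.getD (v - 1) 0 + 1)
        (st.1.insert v nb, if nb > st.2 then nb else st.2)) (d, m)).2
    = (sList f l).foldl max m := by
  induction l generalizing d f m with
  | nil => rfl
  | cons v r ih =>
    have step1 : ((v :: r).foldl
        (fun (st : PySem.Dict Int Int × Int) v =>
          let nb := max (st.1.getD v 0) (st.1.getD (v - 1) 0 + 1)
          (st.1.insert v nb, if nb > st.2 then nb else st.2)) (d, m))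
      = (r.foldl
        (fun (st : PySem.Dict Int Int × Int) v =>
          let nb := max (st.1.getD v 0) (st.1.getD (v - 1) 0 + 1)
          (st.1.insert v nb, if nb > st.2 then nb else st.2))
        (d.insert v (max (d.getD v 0) (d.getD (v - 1) 0 + 1)),
         if max (d.getD v 0) (d.getD (v - 1) 0 + 1) > m
         then max (d.getD v 0) (d.getD (v - 1) 0 + 1) else m)) := rfl
    rw [step1]
    have hnb : max (d.getD v 0) (d.getD (v - 1) 0 + 1) = max (f v) (f (v - 1) + 1) := by
      rw [hd, hd]
    have ha : (sStep f v).2 = f (v - 1) + 1 := rfl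
    rw [ih _ (sStep f v).1 _ ?_ ?_]
    · have hm' : (if max (d.getD v 0) (d.getD (v - 1) 0 + 1) > m
          then max (d.getD v 0) (d.getD (v - 1) 0 + 1) else m) = max m (sStep f v).2 := by
        rw [hnb, ha]; have := hm v; split <;> omega
      rw [hm']
      simp [sList]
    · intro w
      rw [PySem.Dict.getD_insert, hnb]
      simp only [sStep]
      split <;> [rfl; exact hd w]
    · intro w
      simp only [sStep]
      have := hm w; have := hm v
      split <;> (rw [hnb]; split <;> omega)

-- ===== A side =====

def foldC (t : Int) : List (Int × Int) → Int → Int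
  | [], c => c
  | p :: r, c => foldC t r (if t == p.1 then max c (p.2 + 1) else c)

theorem foldC_spec (l : List Int) (f : Int → Int) (t c : Int) (hc : f t + 1 ≤ c) :
    foldC t (l.zip (sList f l)) c = max c (sF f l t + 1) := by
  induction l generalizing f c with
  | nil => simp [foldC, sF]; omega
  | cons v r ih =>
    simp only [sList, List.zip_cons_cons, foldC, sF]
    have ha : (sStep f v).2 = f (v - 1) + 1 := rfl
    by_cases htv : t = v
    · subst htv
      rw [if_pos (by simp)]
      have h1 : (sStep f t).1 t = max (f t) (f (t - 1) + 1) := by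
        simp [sStep]
      rw [ih (sStep f t).1 _ (by rw [h1, ha]; omega)]
      have hX : (sStep f t).1 t ≤ sF (sStep f t).1 r t := sF_mono _ _ _
      rw [ha]
      omega
    · rw [if_neg (by simp [htv])]
      rw [ih (sStep f v).1 _ ?_]
      have h1 : (sStep f v).1 t = f t := by simp only [sStep]; rw [if_neg htv]
      rw [h1]; exact hc

theorem range_fold_zip (xs ys : List Int) (t c : Int) (h : xs.length = ys.length) :
    (List.range xs.length).foldl
      (fun c j => if t == xs.getD j 0 then max c (ys.getD j 0 + 1) else c) c
    = foldC t (xs.zip ys) c := by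
  induction xs generalizing ys c with
  | nil => simp [foldC]
  | cons x xs' ih =>
    cases ys with
    | nil => simp at h
    | cons y ys' =>
      simp only [List.length_cons] at h ⊢
      rw [List.range_succ_eq_map, List.foldl_cons, List.foldl_map]
      simp only [List.getD_cons_zero, List.getD_cons_succ, List.zip_cons_cons, foldC]
      exact ih ys' _ (by omega)

theorem set_fold (P : Nat → Bool) (js : List Nat) (arr : List Int) (c : Int) (i : Nat)
    (hi : i < arr.length) (hj : ∀ j ∈ js, j ≠ i) :
    js.foldl
      (fun a j => if P j then a.set i (max (a.getD i 0) (a.getD j 0 + 1)) else a)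
      (arr.set i c)
    = arr.set i (js.foldl (fun c j => if P j then max c (arr.getD j 0 + 1) else c) c) := by
  induction js generalizing c with
  | nil => rfl
  | cons j js' ih =>
    simp only [List.foldl_cons]
    have hji : j ≠ i := hj j (List.mem_cons_self ..)
    by_cases hp : P j
    · rw [if_pos hp, if_pos hp]
      have h1 : (arr.set i c).getD i 0 = c := by
        simp [List.getD, hi]
      have h2 : (arr.set i c).getD j 0 = arr.getD j 0 := by
        simp [List.getD, List.getElem?_set_ne (by omega : i ≠ j)]
      rw [h1, h2, List.set_set]
      exact ih _ (fun j hm => hj j (List.mem_cons_of_mem _ hm))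
    · rw [if_neg hp, if_neg hp]
      exact ih _ (fun j hm => hj j (List.mem_cons_of_mem _ hm))

theorem A_outer (nums : List Int) (k : Nat) (hk : k ≤ nums.length) :
    (List.range k).foldl (fun a i => dpInner nums a i) (List.replicate nums.length (1 : Int))
    = sList (fun _ => 0) (nums.take k) ++ List.replicate (nums.length - k) (1 : Int) := by
  induction k with
  | zero => simp [sList]
  | succ k ih =>
    have hk' : k < nums.length := by omega
    rw [List.range_succ, List.foldl_append, ih (le_of_lt hk')]
    simp only [List.foldl_cons, List.foldl_nil]
    set pre := sList (fun _ => 0) (nums.take k) with hpre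
    have hlpre : pre.length = k := by
      rw [hpre, sList_length]; simp [le_of_lt hk']
    have hrep : List.replicate (nums.length - k) (1 : Int)
        = 1 :: List.replicate (nums.length - (k + 1)) 1 := by
      rw [show nums.length - k = (nums.length - (k + 1)) + 1 by omega, List.replicate_succ]
    rw [hrep]
    set rest := List.replicate (nums.length - (k + 1)) (1 : Int) with hrest
    have hsetk : ∀ y : Int, (pre ++ 0 :: rest).set k y = pre ++ y :: rest := by
      intro y; rw [List.set_append]; simp [hlpre]
    have hset : pre ++ 1 :: rest = (pre ++ 0 :: rest).set k 1 := (hsetk 1).symm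
    rw [hset]
    unfold dpInner
    rw [set_fold (fun j => (nums.getD k 0 - 1) == nums.getD j 0) (List.range k)
        (pre ++ 0 :: rest) 1 k
        (by simp [hlpre]) (fun j hj => by simp at hj; omega)]
    have hxsl : (nums.take k).length = k := by simp [le_of_lt hk']
    have hcongr : (List.range k).foldl
        (fun c j => if (nums.getD k 0 - 1) == nums.getD j 0
          then max c ((pre ++ 0 :: rest).getD j 0 + 1) else c) 1
      = (List.range (nums.take k).length).foldl
        (fun c j => if (nums.getD k 0 - 1) == (nums.take k).getD j 0
          then max c (pre.getD j 0 + 1) else c) 1 := by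
      rw [hxsl]
      refine PySem.List.foldl_congr_mem _ _ _ _ (fun c j hj => ?_)
      have hjk : j < k := List.mem_range.mp hj
      have e1 : (nums.take k).getD j 0 = nums.getD j 0 := by
        simp [List.getD, hjk]
      have e2 : (pre ++ 0 :: rest).getD j 0 = pre.getD j 0 := by
        simp [List.getD, List.getElem?_append_left (by omega : j < pre.length)]
      rw [e1, e2]
    rw [hcongr, range_fold_zip _ _ _ _ (by rw [hxsl, hlpre]),
        foldC_spec _ _ _ _ (by simp)]
    have hXnn : 0 ≤ sF (fun _ => 0) (nums.take k) (nums.getD k 0 - 1) :=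
      sF_nonneg _ _ _ (fun _ => le_refl 0)
    rw [show max 1 (sF (fun _ => 0) (nums.take k) (nums.getD k 0 - 1) + 1)
        = sF (fun _ => 0) (nums.take k) (nums.getD k 0 - 1) + 1 by omega]
    rw [hsetk]
    have htake : nums.take (k + 1) = nums.take k ++ [nums.getD k 0] := by
      rw [List.take_add_one]
      congr 1
      rw [List.getElem?_eq_getElem hk']
      simp [List.getD, List.getElem?_eq_getElem hk']
    rw [htake, sList_append]
    all_goals simp [sList, sStep, hpre]

theorem main_eq (nums : List Int) (h : nums ≠ []) : dp nums = dp_alt nums := by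
  cases nums with
  | nil => exact absurd rfl h
  | cons x xs =>
    simp only [dp, dp_alt]
    rw [A_outer (x :: xs) (x :: xs).length (le_refl _), List.take_length]
    simp only [Nat.sub_self, List.replicate_zero, List.append_nil]
    rw [B_loop (x :: xs) PySem.Dict.empty (fun _ => 0) 0
        (fun w => PySem.Dict.getD_empty ..) (fun w => le_refl 0)]
    obtain ⟨a, tl, hsl⟩ : ∃ a tl, sList (fun _ => (0 : Int)) (x :: xs) = a :: tl :=
      ⟨_, _, rfl⟩
    rw [hsl, PySem.List.max?_id_cons]
    have ha : 1 ≤ a := sList_pos _ _ (fun _ => le_refl 0) a (hsl ▸ List.mem_cons_self ..)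
    rw [List.foldl_cons, show max (0 : Int) a = a by omega]
    rfl

-- ===== VERDICT (by name: the statement is the Claim_ definition above) =====
theorem dp_spec : Claim_equal_dp := by
  intro nums _ hpre
  unfold Spec_dp
  exact main_eq nums hpre
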